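-- pv_equiv track=rewrite | github.com/pjaehyun/TIL | PS/programmers/주식가격.py | solution
-- ===== SOURCE A (Python) =====
-- def solution(prices):
--     answer = [0] * len(prices)
--     stack = []
--
--     for i in range(len(prices)):
--         while stack and stack[-1][1] > prices[i]:
--             idx, price = stack.pop()
--             answer[idx] = i - idx
--         stack.append((i, prices[i]))
--     for idx, price in stack:
--         answer[idx] = len(prices) - idx - 1
--     return answer
-- ===== SOURCE B (Python) =====
-- def solution(prices):
--     n = len(prices)
--     answer = []
--     for i in range(n):
--         count = 0
--         for j in range(i + 1, n):
--             count += 1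
--             if prices[j] < prices[i]:
--                 break
--         answer.append(count)
--     return answer
-- ===== Notes on version B (the rewrite author's own statement) =====
-- stated objective: simpler
-- what changed: Replaced the single-pass monotonic stack (plus final drain loop) with a plain nested forward scan: for each index, count seconds until the first strictly smaller price.
import Mathlib
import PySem

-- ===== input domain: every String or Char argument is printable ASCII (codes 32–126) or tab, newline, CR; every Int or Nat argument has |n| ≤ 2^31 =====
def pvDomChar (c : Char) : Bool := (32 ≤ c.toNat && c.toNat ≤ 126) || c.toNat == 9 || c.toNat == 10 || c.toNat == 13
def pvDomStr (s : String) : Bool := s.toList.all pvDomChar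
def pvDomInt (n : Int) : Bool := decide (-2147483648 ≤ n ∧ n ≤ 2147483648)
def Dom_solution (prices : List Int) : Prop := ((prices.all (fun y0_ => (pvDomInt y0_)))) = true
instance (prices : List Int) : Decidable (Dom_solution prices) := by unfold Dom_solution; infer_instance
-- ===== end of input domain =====

-- B replaces A's monotonic-stack single pass by a plain nested forward scan (simpler, no stack); same values.

-- ===== PORT A =====
-- inner `while stack and stack[-1][1] > prices[i]` pop loop (stack head = Python stack top)
def pops (cur : Int) (i : Nat) : List Int → List (Nat × Int) → List Int × List (Nat × Int)
  | ans, [] => (ans, [])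
  | ans, (idx, price) :: rest =>
      if price > cur then pops cur i (ans.set idx ((i : Int) - (idx : Int))) rest
      else (ans, (idx, price) :: rest)

-- body of `for i in range(len(prices))`
def stepA (prices : List Int) (st : List Int × List (Nat × Int)) (i : Nat) :
    List Int × List (Nat × Int) :=
  let cur := prices.getD i 0
  let r := pops cur i st.1 st.2
  (r.1, (i, cur) :: r.2)

def solution (prices : List Int) : List Int :=
  let n := prices.length
  let st := (List.range n).foldl (stepA prices) (List.replicate n 0, [])
  -- `for idx, price in stack` runs bottom→top, i.e. over the reverse of our head-is-top list
  st.2.reverse.foldl (fun a e => a.set e.1 ((n : Int) - (e.1 : Int) - 1)) st.1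

-- ===== PORT B =====
-- inner `for j in range(i+1, n): count += 1; if prices[j] < prices[i]: break`, run on the suffix
def countF (p : Int) : List Int → Int
  | [] => 0
  | x :: xs => if x < p then 1 else 1 + countF p xs

def solution_alt (prices : List Int) : List Int :=
  (List.range prices.length).map (fun i => countF (prices.getD i 0) (prices.drop (i + 1)))

-- ===== PRECONDITION & SPEC =====
def Spec_solution (prices : List Int) (out : List Int) : Prop := out = solution_alt prices
instance (prices : List Int) (out : List Int) : Decidable (Spec_solution prices out) := by unfold Spec_solution; infer_instance

-- ===== CLAIM (what is proved, stated in full; the proofs are below) =====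
def Claim_equal_solution : Prop := ∀ (prices : List Int), Dom_solution prices → Spec_solution prices (solution prices)

-- ===== LEMMAS AND PROOFS =====

-- abbreviations used only by the proofs
def gI (prices : List Int) (k : Nat) : Int := prices.getD k 0

def noDrop (prices : List Int) (k i : Nat) : Prop :=
  ∀ j, j < i → k < j → ¬ (gI prices j < gI prices k)

def noDropB (prices : List Int) (k i : Nat) : Bool :=
  (List.range i).all (fun j => ! (decide (k < j) && decide (gI prices j < gI prices k)))

-- survivor indices after processing 0..i-1, bottom→top
def FL (prices : List Int) (i : Nat) : List Nat :=
  (List.range i).filter (fun k => noDropB prices k i)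

theorem noDropB_iff (prices : List Int) (k i : Nat) :
    noDropB prices k i = true ↔ noDrop prices k i := by
  simp only [noDropB, noDrop, List.all_eq_true, List.mem_range, Bool.not_eq_eq_eq_not,
    Bool.not_true, Bool.and_eq_false_iff, decide_eq_false_iff_not]
  constructor
  · intro h j hj hkj
    rcases h j hj with h' | h'
    · omega
    · exact h'
  · intro h j hj
    by_cases hkj : k < j
    · exact Or.inr (h j hj hkj)
    · exact Or.inl hkj

def stackOf (prices : List Int) (i : Nat) : List (Nat × Int) :=
  ((FL prices i).reverse).map (fun k => (k, gI prices k))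

def tgt (prices : List Int) (i : Nat) : Int :=
  countF (prices.getD i 0) (prices.drop (i + 1))

def LoopInv (prices : List Int) (i : Nat) (st : List Int × List (Nat × Int)) : Prop :=
  st.2 = stackOf prices i ∧ st.1.length = prices.length ∧
    ∀ k, k < i → ¬ noDrop prices k i → st.1.getD k 0 = tgt prices k

theorem countF_firstDrop (p : Int) (l : List Int) (m : Nat)
    (hb : ∀ j, j < m → ¬ (l.getD j 0 < p)) (hm : m < l.length) (ha : l.getD m 0 < p) :
    countF p l = (m : Int) + 1 := by
  induction l generalizing m with
  | nil => simp at hm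
  | cons x xs ih =>
    cases m with
    | zero =>
      simp only [List.getD_cons_zero] at ha
      simp [countF, ha]
    | succ m =>
      have hx : ¬ (x < p) := by simpa using hb 0 (Nat.succ_pos m)
      have hrec := ih m (fun j hj => by simpa using hb (j+1) (by omega))
        (by simpa using hm) (by simpa using ha)
      simp only [countF, if_neg hx, hrec]
      push_cast; ring

theorem countF_noDrop (p : Int) (l : List Int)
    (hb : ∀ j, j < l.length → ¬ (l.getD j 0 < p)) :
    countF p l = (l.length : Int) := by
  induction l with
  | nil => simp [countF]
  | cons x xs ih =>
    have hx : ¬ (x < p) := by simpa using hb 0 (by simp)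
    have hrec := ih (fun j hj => by simpa using hb (j+1) (by simpa using hj))
    simp only [countF, if_neg hx, hrec, List.length_cons]
    push_cast; ring

theorem getD_drop (l : List Int) (a j : Nat) :
    (l.drop a).getD j 0 = l.getD (a + j) 0 := by
  simp [List.getD_eq_getElem?_getD, List.getElem?_drop]

theorem tgt_drop (prices : List Int) (k i : Nat) (hki : k < i) (hin : i < prices.length)
    (hnd : noDrop prices k i) (hdrop : gI prices i < gI prices k) :
    tgt prices k = (i : Int) - (k : Int) := by
  have hlen : (prices.drop (k+1)).length = prices.length - (k+1) := by
    simp [List.length_drop]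
  have h := countF_firstDrop (prices.getD k 0) (prices.drop (k+1)) (i - k - 1)
    (fun j hj => by
      rw [getD_drop]
      exact hnd (k + 1 + j) (by omega) (by omega))
    (by omega)
    (by
      rw [getD_drop]
      have : k + 1 + (i - k - 1) = i := by omega
      rw [this]; exact hdrop)
  unfold tgt
  rw [h]
  have : ((i - k - 1 : Nat) : Int) = (i : Int) - k - 1 := by omega
  omega

theorem tgt_surv (prices : List Int) (k : Nat) (hk : k < prices.length)
    (hnd : noDrop prices k prices.length) :
    tgt prices k = (prices.length : Int) - (k : Int) - 1 := by
  have hlen : (prices.drop (k+1)).length = prices.length - (k+1) := by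
    simp [List.length_drop]
  have h := countF_noDrop (prices.getD k 0) (prices.drop (k+1))
    (fun j hj => by
      rw [getD_drop]
      exact hnd (k + 1 + j) (by omega) (by omega))
  unfold tgt
  rw [h, hlen]
  omega

theorem length_foldl_set (w : Nat → Int) (l : List (Nat × Int)) (ans : List Int) :
    (l.foldl (fun a e => a.set e.1 (w e.1)) ans).length = ans.length := by
  induction l generalizing ans with
  | nil => rfl
  | cons e t ih => simp [List.foldl_cons, ih, List.length_set]

theorem getD_foldl_set_ne (w : Nat → Int) (l : List (Nat × Int)) (ans : List Int) (k : Nat)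
    (h : ∀ e ∈ l, e.1 ≠ k) :
    (l.foldl (fun a e => a.set e.1 (w e.1)) ans).getD k 0 = ans.getD k 0 := by
  induction l generalizing ans with
  | nil => rfl
  | cons e t ih =>
    have he : e.1 ≠ k := h e (by simp)
    rw [List.foldl_cons, ih _ (fun x hx => h x (by simp [hx]))]
    simp [List.getD_eq_getElem?_getD, List.getElem?_set_ne he]

theorem getD_foldl_set_mem (w : Nat → Int) (l : List (Nat × Int)) (ans : List Int)
    (k : Nat) (v : Int) (hdis : l.Pairwise (fun a b => a.1 ≠ b.1)) (hmem : (k, v) ∈ l)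
    (hk : k < ans.length) :
    (l.foldl (fun a e => a.set e.1 (w e.1)) ans).getD k 0 = w k := by
  induction l generalizing ans with
  | nil => simp at hmem
  | cons e t ih =>
    rcases List.mem_cons.mp hmem with h1 | h1
    · subst h1
      rw [List.foldl_cons, getD_foldl_set_ne _ _ _ _ (by
        intro x hx
        exact (List.rel_of_pairwise_cons hdis hx).symm)]
      simp [List.getD_eq_getElem?_getD, hk]
    · rw [List.foldl_cons]
      exact ih (ans.set e.1 (w e.1)) (List.Pairwise.of_cons hdis) h1
        (by simpa [List.length_set] using hk)

theorem pops_split (cur : Int) (i : Nat) (s1 s2 : List (Nat × Int)) (ans : List Int)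
    (h1 : ∀ e ∈ s1, cur < e.2)
    (h2 : ∀ e t, s2 = e :: t → ¬ (cur < e.2)) :
    pops cur i ans (s1 ++ s2) =
      (s1.foldl (fun a e => a.set e.1 ((i : Int) - (e.1 : Int))) ans, s2) := by
  induction s1 generalizing ans with
  | nil =>
    cases s2 with
    | nil => rfl
    | cons e t =>
      obtain ⟨idx, price⟩ := e
      have := h2 (idx, price) t rfl
      simp only [List.nil_append, pops, List.foldl_nil]
      rw [if_neg (by simpa using this)]
  | cons e s1' ih =>
    obtain ⟨idx, price⟩ := e
    have hp : cur < price := h1 (idx, price) (by simp)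
    simp only [List.cons_append, pops, List.foldl_cons]
    rw [if_pos hp]
    exact ih _ (fun x hx => h1 x (by simp [hx]))

theorem partition_pairwise {α : Type} (p : α → Bool) (l : List α)
    (hp : l.Pairwise (fun a b => p a = true → p b = true)) :
    l = l.filter (fun x => ! p x) ++ l.filter p := by
  induction l with
  | nil => rfl
  | cons x t ih =>
    have hrel : ∀ b ∈ t, p x = true → p b = true := fun b hb => List.rel_of_pairwise_cons hp hb
    have hpt := List.Pairwise.of_cons hp
    by_cases hx : p x = true
    · have hall : ∀ a ∈ x :: t, p a = true := by
        intro a ha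
        rcases List.mem_cons.mp ha with h | h
        · subst h; exact hx
        · exact hrel a h hx
      rw [List.filter_eq_self.mpr hall]
      have : (x :: t).filter (fun y => ! p y) = [] := by
        rw [List.filter_eq_nil_iff]
        intro a ha; simp [hall a ha]
      rw [this, List.nil_append]
    · have h1 : (x :: t).filter (fun y => ! p y) = x :: t.filter (fun y => ! p y) := by
        simp [hx]
      have h2 : (x :: t).filter p = t.filter p := by
        simp [hx]
      rw [h1, h2, List.cons_append]
      exact congrArg (x :: ·) (ih hpt)

theorem mem_FL (prices : List Int) (i k : Nat) :
    k ∈ FL prices i ↔ k < i ∧ noDrop prices k i := by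
  simp [FL, List.mem_filter, List.mem_range, noDropB_iff, and_comm]

theorem FL_pairwise_lt (prices : List Int) (i : Nat) : (FL prices i).Pairwise (· < ·) := by
  exact (List.pairwise_lt_range).filter _

theorem FL_succ (prices : List Int) (i : Nat) :
    FL prices (i + 1) =
      (FL prices i).filter (fun k => ! decide (gI prices i < gI prices k)) ++ [i] := by
  unfold FL
  rw [List.range_succ, List.filter_append]
  have hi : (List.filter (fun k => noDropB prices k (i+1)) [i]) = [i] := by
    simp only [List.filter_cons, List.filter_nil]
    rw [if_pos]
    rw [noDropB_iff]
    intro j hj hji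
    omega
  rw [hi, List.filter_filter]
  apply congrArg (· ++ [i])
  apply List.filter_congr
  intro k hk
  have hki : k < i := List.mem_range.mp hk
  simp only [Bool.and_comm]
  rw [Bool.eq_iff_iff]
  simp only [Bool.and_eq_true, noDropB_iff, Bool.not_eq_true', decide_eq_false_iff_not]
  constructor
  · intro h
    refine ⟨fun j hj hkj => h j (by omega) hkj, h i (by omega) hki⟩
  · rintro ⟨h1, h2⟩ j hj hkj
    rcases Nat.lt_succ_iff_lt_or_eq.mp hj with h | h
    · exact h1 j h hkj
    · subst h; exact h2

theorem map_pair_ne (prices : List Int) (l : List Nat) (h : l.Pairwise (· ≠ ·)) :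
    (l.map (fun k => (k, gI prices k))).Pairwise (fun a b => a.1 ≠ b.1) :=
  h.map _ (fun _ _ hab => hab)

theorem FL_rev_pair_ne (prices : List Int) (l : List Nat) (h : l.Pairwise (· < ·)) :
    (l.reverse.map (fun k => (k, gI prices k))).Pairwise (fun a b => a.1 ≠ b.1) :=
  map_pair_ne prices l.reverse ((List.pairwise_reverse.mpr h).imp (fun hab => Nat.ne_of_gt hab))

theorem inv_step (prices : List Int) (i : Nat) (st : List Int × List (Nat × Int))
    (hin : i < prices.length) (hInv : LoopInv prices i st) :
    LoopInv prices (i + 1) (stepA prices st i) := by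
  obtain ⟨hstack, hlen, hans⟩ := hInv
  have hcur : prices.getD i 0 = gI prices i := rfl
  -- partition the survivor list at the pop condition
  have hmono : (FL prices i).Pairwise
      (fun a b => (decide (gI prices i < gI prices a)) = true →
                  (decide (gI prices i < gI prices b)) = true) := by
    refine (FL_pairwise_lt prices i).imp_of_mem ?_
    intro a b ha hb hab
    obtain ⟨hai, hand⟩ := (mem_FL prices i a).mp ha
    obtain ⟨hbi, _⟩ := (mem_FL prices i b).mp hb
    simp only [decide_eq_true_iff]
    intro hcur2
    have := hand b hbi hab
    omega
  have hpart := partition_pairwise (fun k => decide (gI prices i < gI prices k)) _ hmono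
  set keep := (FL prices i).filter (fun k => ! decide (gI prices i < gI prices k)) with hkeep
  set pop := (FL prices i).filter (fun k => decide (gI prices i < gI prices k)) with hpop
  have hstk2 : stackOf prices i =
      pop.reverse.map (fun k => (k, gI prices k)) ++ keep.reverse.map (fun k => (k, gI prices k)) := by
    rw [stackOf, hpart]
    simp
  have hpops := pops_split (gI prices i) i (pop.reverse.map (fun k => (k, gI prices k)))
      (keep.reverse.map (fun k => (k, gI prices k))) st.1
      (by
        intro e he
        simp only [List.mem_map, List.mem_reverse] at he
        obtain ⟨k, hk, rfl⟩ := he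
        have := (List.mem_filter.mp hk).2
        simpa using this)
      (by
        intro e t het
        have he : e ∈ keep.reverse.map (fun k => (k, gI prices k)) := by rw [het]; simp
        simp only [List.mem_map, List.mem_reverse] at he
        obtain ⟨k, hk, rfl⟩ := he
        have := (List.mem_filter.mp hk).2
        simpa using this)
  refine ⟨?_, ?_, ?_⟩
  · -- stack shape
    show ((i, prices.getD i 0) :: (pops (prices.getD i 0) i st.1 st.2).2) = stackOf prices (i + 1)
    rw [hcur, hstack, hstk2, hpops]
    rw [stackOf, FL_succ]
    simp [hkeep]
  · -- length
    show (pops (prices.getD i 0) i st.1 st.2).1.length = prices.length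
    rw [hcur, hstack, hstk2, hpops]
    rw [length_foldl_set (fun k => (i : Int) - (k : Int))]
    exact hlen
  · -- answer values
    intro k hk hnd
    show (pops (prices.getD i 0) i st.1 st.2).1.getD k 0 = tgt prices k
    rw [hcur, hstack, hstk2, hpops]
    have hki : k < i := by
      rcases Nat.lt_succ_iff_lt_or_eq.mp hk with h | h
      · exact h
      · exfalso; subst h; exact hnd (fun j hj hkj => by omega)
    have hpopPW : pop.Pairwise (· < ·) := (FL_pairwise_lt prices i).filter _
    by_cases hold : noDrop prices k i
    · -- k is popped at step i
      have hdropi : gI prices i < gI prices k := by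
        by_contra hcon
        apply hnd
        intro j hj hkj
        rcases Nat.lt_succ_iff_lt_or_eq.mp hj with h | h
        · exact hold j h hkj
        · subst h; omega
      have hkpop : k ∈ pop := by
        rw [hpop, List.mem_filter]
        exact ⟨(mem_FL prices i k).mpr ⟨hki, hold⟩, by simpa using hdropi⟩
      have hmem : (k, gI prices k) ∈ pop.reverse.map (fun j => (j, gI prices j)) := by
        simp only [List.mem_map, List.mem_reverse]
        exact ⟨k, hkpop, rfl⟩
      rw [getD_foldl_set_mem (fun j => (i : Int) - (j : Int)) _ _ k (gI prices k)
        (FL_rev_pair_ne prices pop hpopPW) hmem (by omega)]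
      exact (tgt_drop prices k i hki hin hold hdropi).symm
    · -- k was settled earlier
      rw [getD_foldl_set_ne (fun j => (i : Int) - (j : Int)) _ _ k
        (by
          intro e he
          simp only [List.mem_map, List.mem_reverse] at he
          obtain ⟨j, hj, rfl⟩ := he
          have := ((mem_FL prices i j).mp (List.mem_of_mem_filter hj)).2
          intro hjk
          exact hold (hjk ▸ this))]
      exact hans k hki hold

theorem inv_all (prices : List Int) (i : Nat) (hi : i ≤ prices.length) :
    LoopInv prices i ((List.range i).foldl (stepA prices) (List.replicate prices.length 0, [])) := by
  induction i with
  | zero =>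
    refine ⟨rfl, by simp, ?_⟩
    intro k hk
    omega
  | succ i ih =>
    rw [List.range_succ, List.foldl_append, List.foldl_cons, List.foldl_nil]
    exact inv_step prices i _ (by omega) (ih (by omega))

-- ===== VERDICT (by name: the statement is the Claim_ definition above) =====
theorem solution_spec : Claim_equal_solution := by
  intro prices _
  unfold Spec_solution solution
  obtain ⟨hstack, hlen, hans⟩ := inv_all prices prices.length le_rfl
  set st := (List.range prices.length).foldl (stepA prices) (List.replicate prices.length 0, []) with hst
  set n := prices.length with hn
  have hrev : st.2.reverse = (FL prices n).map (fun k => (k, gI prices k)) := by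
    rw [hstack, stackOf]
    simp [List.map_reverse]
  set r := st.2.reverse.foldl (fun a e => a.set e.1 ((n : Int) - (e.1 : Int) - 1)) st.1 with hr
  have hrlen : r.length = n := by
    rw [hr, hrev, length_foldl_set (fun k => (n : Int) - (k : Int) - 1)]
    exact hlen
  have hval : ∀ k, k < n → r.getD k 0 = tgt prices k := by
    intro k hk
    rw [hr, hrev]
    by_cases hnd : noDrop prices k n
    · have hmem : (k, gI prices k) ∈ (FL prices n).map (fun j => (j, gI prices j)) := by
        simp only [List.mem_map]
        exact ⟨k, (mem_FL prices n k).mpr ⟨hk, hnd⟩, rfl⟩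
      rw [getD_foldl_set_mem (fun j => (n : Int) - (j : Int) - 1) _ _ k (gI prices k)
        (map_pair_ne prices _ ((FL_pairwise_lt prices n).imp (fun h => Nat.ne_of_lt h)))
        hmem (by omega)]
      exact (tgt_surv prices k hk hnd).symm
    · rw [getD_foldl_set_ne (fun j => (n : Int) - (j : Int) - 1) _ _ k
        (by
          intro e he
          simp only [List.mem_map] at he
          obtain ⟨j, hj, rfl⟩ := he
          have := ((mem_FL prices n j).mp hj).2
          intro hjk
          exact hnd (hjk ▸ this))]
      exact hans k hk hnd
  apply List.ext_getElem
  · simp [hrlen, solution_alt, hn]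
  · intro k h1 h2
    have hk : k < n := by rwa [hrlen] at h1
    have := hval k hk
    rw [List.getD_eq_getElem r 0 h1] at this
    rw [this]
    simp [solution_alt, tgt]
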